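-- pv_equiv track=rewrite | github.com/poliorang/Python_BMSTU_1_semester | lab_10.py | oper_and_num
-- ===== SOURCE A (Python) =====
-- operations = ['^', '*', '/', '%', '+', '-', 'sqrt', '(', ')', '=']
--
-- numbers = ['1', '2', '3', '4', '5', '6', '7', '8', '9', '0', '.']
--
-- def oper_and_num(line): # проверка на то, что выражение содержит и цифры, и знаки операций
--     oper = num = False
--     for simbol in line:
--         if simbol in operations:
--             oper = True
--         if simbol in numbers:
--             num = True
--     if oper and num:
--         return True
--     else:
--         return False
-- ===== SOURCE B (Python) =====
-- operations = ['^', '*', '/', '%', '+', '-', 'sqrt', '(', ')', '=']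
--
-- numbers = ['1', '2', '3', '4', '5', '6', '7', '8', '9', '0', '.']
--
-- def oper_and_num(line):
--     chars = set(line)
--     return bool(chars & set(operations)) and bool(chars & set(numbers))
-- ===== Notes on version B (the rewrite author's own statement) =====
-- stated objective: idiomatic
-- what changed: Replaced the flagged character-by-character scan with building the set of distinct characters once and testing it for non-empty intersection with the operator and digit sets.
import Mathlib
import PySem

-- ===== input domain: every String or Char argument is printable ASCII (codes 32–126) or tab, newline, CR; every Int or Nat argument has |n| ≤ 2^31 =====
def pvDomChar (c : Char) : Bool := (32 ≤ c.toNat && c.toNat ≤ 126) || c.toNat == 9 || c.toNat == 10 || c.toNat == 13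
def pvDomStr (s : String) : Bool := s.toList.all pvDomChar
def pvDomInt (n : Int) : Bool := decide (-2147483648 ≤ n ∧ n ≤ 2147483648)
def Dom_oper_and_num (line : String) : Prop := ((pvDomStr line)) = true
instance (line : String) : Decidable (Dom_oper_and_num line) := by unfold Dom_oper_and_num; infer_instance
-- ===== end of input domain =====

-- B builds the set of distinct characters once and intersects it with the operator and digit sets (idiomatic; the flagged scan is gone).

-- ===== PORT A =====
def pyOperations : List String := ["^", "*", "/", "%", "+", "-", "sqrt", "(", ")", "="]
def pyNumbers : List String := ["1", "2", "3", "4", "5", "6", "7", "8", "9", "0", "."]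

-- loop body of A: the two flag updates for one character
def pyStep (s : Bool × Bool) (simbol : Char) : Bool × Bool :=
  let s1 : Bool × Bool := if pyOperations.contains (String.ofList [simbol]) then (true, s.2) else s
  if pyNumbers.contains (String.ofList [simbol]) then (s1.1, true) else s1

def oper_and_num (line : String) : Bool :=
  let st := line.toList.foldl pyStep (false, false)
  if st.1 && st.2 then true else false

-- ===== PORT B =====
def oper_and_num_alt (line : String) : Bool :=
  let chars : PySem.Set String := PySem.Set.ofList (line.toList.map (fun c => String.ofList [c]))
  !(PySem.Set.inter chars (PySem.Set.ofList pyOperations)).isEmpty &&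
  !(PySem.Set.inter chars (PySem.Set.ofList pyNumbers)).isEmpty

-- ===== PRECONDITION & SPEC =====
def Spec_oper_and_num (line : String) (out : Bool) : Prop := out = oper_and_num_alt line
instance (line : String) (out : Bool) : Decidable (Spec_oper_and_num line out) := by unfold Spec_oper_and_num; infer_instance

-- ===== CLAIM (what is proved, stated in full; the proofs are below) =====
def Claim_equal_oper_and_num : Prop := ∀ (line : String), Dom_oper_and_num line → Spec_oper_and_num line (oper_and_num line)

-- ===== LEMMAS AND PROOFS =====

-- one step of A's loop just or's the two membership tests into the flags
theorem pyStep_eq (o n : Bool) (c : Char) :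
    pyStep (o, n) c = (o || pyOperations.contains (String.ofList [c]),
                       n || pyNumbers.contains (String.ofList [c])) := by
  unfold pyStep
  by_cases ho : String.ofList [c] ∈ pyOperations <;>
    by_cases hn : String.ofList [c] ∈ pyNumbers <;>
    simp [ho, hn]

-- A's loop computes the two 'any' flags
theorem oper_and_num_foldl (l : List Char) (o n : Bool) :
    l.foldl pyStep (o, n)
    = (o || l.any (fun c => pyOperations.contains (String.ofList [c])),
       n || l.any (fun c => pyNumbers.contains (String.ofList [c]))) := by
  induction l generalizing o n with
  | nil => simp
  | cons c t ih =>
    rw [List.foldl_cons, pyStep_eq, ih]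
    simp [Bool.or_assoc]

-- B's intersection test is the 'any' flag
theorem inter_nonempty (xs t : List String) :
    (!(PySem.Set.inter (PySem.Set.ofList xs) (PySem.Set.ofList t)).isEmpty)
    = xs.any (fun x => t.contains x) := by
  rcases h : (!(PySem.Set.inter (PySem.Set.ofList xs) (PySem.Set.ofList t)).isEmpty) with _ | _
  · simp only [Bool.not_eq_false', List.isEmpty_iff] at h
    symm
    simp only [List.any_eq_false]
    intro x hx hc
    have : x ∈ PySem.Set.inter (PySem.Set.ofList xs) (PySem.Set.ofList t) := by
      rw [PySem.Set.mem_inter]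
      exact ⟨(PySem.Set.mem_ofList _ _).2 hx, (PySem.Set.mem_ofList _ _).2 (by simpa using hc)⟩
    simp [h] at this
  · simp only [Bool.not_eq_true', List.isEmpty_eq_false_iff_exists_mem] at h
    obtain ⟨x, hx⟩ := h
    rw [PySem.Set.mem_inter] at hx
    symm
    simp only [List.any_eq_true]
    exact ⟨x, (PySem.Set.mem_ofList _ _).1 hx.1, by simpa using (PySem.Set.mem_ofList _ _).1 hx.2⟩

-- ===== VERDICT (by name: the statement is the Claim_ definition above) =====
theorem oper_and_num_spec : Claim_equal_oper_and_num := by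
  intro line _
  unfold Spec_oper_and_num oper_and_num oper_and_num_alt
  simp [oper_and_num_foldl, inter_nonempty, List.any_map, Function.comp_def, List.any_eq]
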